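-- pv_equiv track=rewrite | github.com/ericbgarnick/AOC | 2020/day09/day09.py | can_sum_to_num
-- ===== SOURCE A (Python) =====
-- from typing import Tuple, List
--
-- PREAMBLE = 25
--
-- def can_sum_to_num(record: List[int], target: int, segment_end: int) -> bool:
--     """Return True if any 2 values in record from segment_end - PREAMBLE through segment_end
--     can sum to target.  Otherwise return False."""
--     complements = set()
--     for num in record[segment_end - PREAMBLE:segment_end]:
--         if num in complements:
--             return True
--         else:
--             complements.add(target - num)
--     return False
-- ===== SOURCE B (Python) =====
-- PREAMBLE = 25
--
-- def can_sum_to_num(record, target, segment_end):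
--     """Index-based brute force: enumerate all ordered index pairs (i, j)
--     with i < j in the window and test window[i] + window[j] == target."""
--     window = record[segment_end - PREAMBLE:segment_end]
--     n = len(window)
--     for i in range(n):
--         for j in range(n):
--             if i < j and window[i] + window[j] == target:
--                 return True
--     return False
-- ===== Notes on version B (the rewrite author's own statement) =====
-- stated objective: alternative
-- what changed: Replaced the complement-set single pass with an index-based brute-force scan over all i<j position pairs of the window.
import Mathlib
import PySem

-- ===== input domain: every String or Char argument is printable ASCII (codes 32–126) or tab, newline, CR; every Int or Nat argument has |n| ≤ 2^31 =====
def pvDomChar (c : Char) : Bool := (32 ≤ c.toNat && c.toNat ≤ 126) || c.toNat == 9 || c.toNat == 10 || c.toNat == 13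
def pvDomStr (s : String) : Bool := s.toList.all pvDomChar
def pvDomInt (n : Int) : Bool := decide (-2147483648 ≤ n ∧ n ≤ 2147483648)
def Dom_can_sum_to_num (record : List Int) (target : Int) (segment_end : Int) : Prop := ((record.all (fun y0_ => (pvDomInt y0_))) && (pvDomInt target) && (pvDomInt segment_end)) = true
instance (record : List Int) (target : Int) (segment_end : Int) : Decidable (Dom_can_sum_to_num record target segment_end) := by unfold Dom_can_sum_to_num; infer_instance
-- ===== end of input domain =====

-- B replaces A's complement-set single pass with an index-based brute-force scan over all i<j position pairs (alternative decomposition, same result).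


-- ===== PORT A =====
def canSumLoopA (target : Int) : List Int → PySem.Set Int → Bool
  | [], _ => false
  | n :: rest, comps =>
    if comps.contains n then true
    else canSumLoopA target rest (comps.add (target - n))

def can_sum_to_num (record : List Int) (target : Int) (segment_end : Int) : Bool :=
  canSumLoopA target (PySem.List.slice record (some (segment_end - 25)) (some segment_end)) PySem.Set.empty

-- ===== PORT B =====
def can_sum_to_num_alt (record : List Int) (target : Int) (segment_end : Int) : Bool :=
  let w := PySem.List.slice record (some (segment_end - 25)) (some segment_end)
  let n := w.length
  (List.range n).any fun i =>
    (List.range n).any fun j =>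
      decide (i < j) && (w.getD i 0 + w.getD j 0 == target)

-- ===== PRECONDITION & SPEC =====
def Spec_can_sum_to_num (record : List Int) (target : Int) (segment_end : Int) (out : Bool) : Prop := out = can_sum_to_num_alt record target segment_end
instance (record : List Int) (target : Int) (segment_end : Int) (out : Bool) : Decidable (Spec_can_sum_to_num record target segment_end out) := by unfold Spec_can_sum_to_num; infer_instance

-- ===== CLAIM (what is proved, stated in full; the proofs are below) =====
def Claim_equal_can_sum_to_num : Prop := ∀ (record : List Int) (target : Int) (segment_end : Int), Dom_can_sum_to_num record target segment_end → Spec_can_sum_to_num record target segment_end (can_sum_to_num record target segment_end)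

-- ===== LEMMAS AND PROOFS =====
-- proof-side intermediate: head-vs-rest pairwise scan, bridging A's set loop and B's index pairs
def pairScan (target : Int) : List Int → Bool
  | [] => false
  | x :: rest =>
    if rest.any (fun y => x + y == target) then true
    else pairScan target rest

lemma any_or (l : List Int) (p q : Int → Bool) :
    (l.any (fun n => p n || q n)) = (l.any p || l.any q) := by
  induction l with
  | nil => rfl
  | cons a l ih => simp [List.any_cons, ih, Bool.or_assoc, Bool.or_left_comm]

lemma loopA_eq (target : Int) (l : List Int) (comps : PySem.Set Int) :
    canSumLoopA target l comps = (l.any (fun n => comps.contains n) || pairScan target l) := by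
  induction l generalizing comps with
  | nil => rfl
  | cons x rest ih =>
    by_cases hc : comps.contains x
    · have hx : x ∈ comps := (PySem.Set.contains_iff _ _).mp hc
      simp [canSumLoopA, pairScan, hx]
    · have hb : comps.contains x = false := by simpa using hc
      simp only [canSumLoopA, hb, if_neg Bool.false_ne_true, ih]
      have hmem : ∀ n : Int, (comps.add (target - x)).contains n
          = (comps.contains n || (x + n == target)) := by
        intro n
        have hiff : (n ∈ comps.add (target - x)) ↔ (n ∈ comps ∨ x + n = target) := by
          rw [PySem.Set.mem_add _ _ _]
          constructor
          · rintro (h | h)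
            · exact Or.inl h
            · exact Or.inr (by omega)
          · rintro (h | h)
            · exact Or.inl h
            · exact Or.inr (by omega)
        by_cases hA : n ∈ comps.add (target - x)
        · rw [(PySem.Set.contains_iff _ _).2 hA]
          rcases hiff.1 hA with h | h
          · rw [(PySem.Set.contains_iff _ _).2 h]; simp
          · have hbe : (x + n == target) = true := by simpa using h
            simp [hbe]
        · have hL : (comps.add (target - x)).contains n = false :=
            Bool.eq_false_iff.mpr (fun hh => hA ((PySem.Set.contains_iff _ _).1 hh))
          have hc1 : comps.contains n = false :=
            Bool.eq_false_iff.mpr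
              (fun hh => hA (hiff.2 (Or.inl ((PySem.Set.contains_iff _ _).1 hh))))
          have hc2 : (x + n == target) = false :=
            Bool.eq_false_iff.mpr (fun hh => hA (hiff.2 (Or.inr (beq_iff_eq.mp hh))))
          rw [hL, hc1, hc2]
          rfl
      have hsplit : rest.any (fun n => (comps.add (target - x)).contains n)
          = (rest.any (fun n => comps.contains n) || rest.any (fun y => x + y == target)) := by
        rw [show (fun n => (comps.add (target - x)).contains n)
            = (fun n => comps.contains n || (x + n == target)) from funext hmem]
        exact any_or rest _ _
      simp only [hsplit, pairScan, List.any_cons, hb, Bool.false_or]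
      cases h1 : rest.any (fun n => comps.contains n) <;>
        cases h2 : rest.any (fun y => x + y == target) <;> simp

lemma pairScan_iff (target : Int) (l : List Int) :
    pairScan target l = true ↔
      ∃ i j : Nat, i < j ∧ j < l.length ∧ l.getD i 0 + l.getD j 0 = target := by
  induction l with
  | nil => simp [pairScan]
  | cons x rest ih =>
    constructor
    · intro h
      by_cases hany : rest.any (fun y => x + y == target) = true
      · rcases List.any_eq_true.mp hany with ⟨y, hy, hsum⟩
        rcases List.mem_iff_getElem.mp hy with ⟨k, hk, hke⟩
        refine ⟨0, k + 1, Nat.succ_pos k, by simpa using Nat.succ_lt_succ hk, ?_⟩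
        simp only [List.getD_cons_zero, List.getD_cons_succ,
          List.getD_eq_getElem _ _ hk, hke]
        exact beq_iff_eq.mp hsum
      · have h' : pairScan target rest = true := by
          simpa [pairScan, hany] using h
        rcases ih.mp h' with ⟨i, j, hij, hjl, hsum⟩
        exact ⟨i + 1, j + 1, Nat.succ_lt_succ hij, Nat.succ_lt_succ hjl, by simpa using hsum⟩
    · rintro ⟨i, j, hij, hjl, hsum⟩
      cases i with
      | zero =>
        cases j with
        | zero => omega
        | succ k =>
          have hk : k < rest.length := by simpa using hjl
          have hy : rest.getD k 0 ∈ rest := by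
            rw [List.getD_eq_getElem _ _ hk]; exact List.getElem_mem hk
          have hany : rest.any (fun y => x + y == target) = true :=
            List.any_eq_true.mpr ⟨rest.getD k 0, hy, beq_iff_eq.mpr (by simpa using hsum)⟩
          simp [pairScan, hany]
      | succ i' =>
        cases j with
        | zero => omega
        | succ j' =>
          have : pairScan target rest = true :=
            ih.mpr ⟨i', j', by omega, by simpa using hjl, by simpa using hsum⟩
          by_cases hany : rest.any (fun y => x + y == target) = true <;>
            simp [pairScan, hany, this]

lemma altScan_iff (target : Int) (w : List Int) :
    ((List.range w.length).any fun i =>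
      (List.range w.length).any fun j =>
        decide (i < j) && (w.getD i 0 + w.getD j 0 == target)) = true ↔
      ∃ i j : Nat, i < j ∧ j < w.length ∧ w.getD i 0 + w.getD j 0 = target := by
  simp only [List.any_eq_true, List.mem_range, Bool.and_eq_true, decide_eq_true_eq,
    beq_iff_eq]
  constructor
  · rintro ⟨i, hi, j, hj, hij, hsum⟩
    exact ⟨i, j, hij, hj, hsum⟩
  · rintro ⟨i, j, hij, hj, hsum⟩
    exact ⟨i, by omega, j, hj, hij, hsum⟩

-- ===== VERDICT (by name: the statement is the Claim_ definition above) =====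
theorem can_sum_to_num_spec : Claim_equal_can_sum_to_num := by
  intro record target segment_end _
  unfold Spec_can_sum_to_num can_sum_to_num can_sum_to_num_alt
  rw [loopA_eq]
  have hempty : ∀ l : List Int, l.any (fun n => PySem.Set.contains PySem.Set.empty n) = false := by
    intro l
    induction l with
    | nil => rfl
    | cons a l ih => simp [List.any_cons, PySem.Set.empty, PySem.Set.contains]
  rw [hempty, Bool.false_or]
  set w := PySem.List.slice record (some (segment_end - 25)) (some segment_end) with hw
  exact Bool.eq_iff_iff.mpr ((pairScan_iff target w).trans (altScan_iff target w).symm)
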